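-- pv_equiv track=rewrite | github.com/mglubber/flair | flair/bam2Bed12.py | junctionsToBed12
-- ===== SOURCE A (Python) =====
-- def junctionsToBed12(start, end, coords):
--     """
--     junctionsToBed12 takes in alignment start position, end position, and genomic junction coordinates
--     and converts them to start, end, and length blocks for bed12.
--     """
--
--     sizes, starts = [], []
--
--     # coords with 0 length are reads without introns
--     if len(coords) > 0:
--         for num, junction in enumerate(coords, 0):
--             # a junction is 2 Splice Sites
--             ss1, ss2 = junction
--
--             # initial start is 0
--             if num == 0:
--                 st = 0
--                 size = abs(start-ss1)
--             else:
--                 st = coords[num-1][1] - start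
--                 size = ss1 - (st + start)
--             starts.append(st)
--             sizes.append(size)
--
--         # Here is the computation for the BED end coordinate
--         st = coords[-1][1] - start
--         size = end - (st + start)
--         starts.append(st)
--         sizes.append(size)
--
--         return len(starts), sizes, starts
--     else:
--         return 1, [end-start], [0]
-- ===== SOURCE B (Python) =====
-- def junctionsToBed12(start, end, coords):
--     """
--     junctionsToBed12 takes in alignment start position, end position, and genomic junction coordinates
--     and converts them to start, end, and length blocks for bed12.
--     """
--     if not coords:
--         return 1, [end - start], [0]
--
--     def rest_blocks(block_start, rest):
--         # recursively build (sizes, starts) for the blocks beginning at block_start,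
--         # separated by the junctions in rest; the final block ends at `end`
--         if not rest:
--             return [end - block_start], [block_start - start]
--         ss1, ss2 = rest[0]
--         sizes, starts = rest_blocks(ss2, rest[1:])
--         return [ss1 - block_start] + sizes, [block_start - start] + starts
--
--     ss1, ss2 = coords[0]
--     sizes, starts = rest_blocks(ss2, coords[1:])
--     return len(starts) + 1, [abs(start - ss1)] + sizes, [0] + starts
-- ===== Notes on version B (the rewrite author's own statement) =====
-- stated objective: alternative
-- what changed: B replaces A's indexed enumerate loop with its coords[num-1] back-reference and separate trailing-block append by a structural recursion that threads the current block's start coordinate and builds (sizes, starts) back-to-front, with the first block (the only one A takes abs() of) handled outside the recursion.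
import Mathlib
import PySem

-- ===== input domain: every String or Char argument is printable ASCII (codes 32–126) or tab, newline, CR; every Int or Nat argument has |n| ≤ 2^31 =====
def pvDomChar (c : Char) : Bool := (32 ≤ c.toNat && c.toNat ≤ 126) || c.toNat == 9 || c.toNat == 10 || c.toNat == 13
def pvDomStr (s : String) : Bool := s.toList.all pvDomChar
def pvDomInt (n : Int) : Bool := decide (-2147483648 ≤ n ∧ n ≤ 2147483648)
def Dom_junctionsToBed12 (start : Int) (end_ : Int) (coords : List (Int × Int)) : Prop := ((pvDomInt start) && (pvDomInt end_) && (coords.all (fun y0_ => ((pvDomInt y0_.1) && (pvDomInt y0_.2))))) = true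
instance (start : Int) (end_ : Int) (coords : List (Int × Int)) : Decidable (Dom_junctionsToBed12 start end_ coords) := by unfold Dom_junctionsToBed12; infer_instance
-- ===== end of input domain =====

-- B replaces A's indexed loop (which back-references coords[num-1] and appends the trailing block
-- separately) by a structural recursion threading the current block's start; objective: alternative.

-- ===== PORT A =====
-- one iteration of A's for-loop body: returns (st, size).  coords[num-1] is accessed with
-- pyGet? … getD: the index is always in range when the loop calls it (num ≥ 1), so the
-- default is never used and the access is exact.
def stepA (start : Int) (coords : List (Int × Int)) (p : Int × (Int × Int)) : Int × Int :=
  let num := p.1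
  let ss1 := p.2.1
  if num == 0 then ((0 : Int), |start - ss1|)
  else
    let st := ((PySem.List.pyGet? coords (num - 1)).getD (0, 0)).2 - start
    (st, ss1 - (st + start))

def junctionsToBed12 (start : Int) (end_ : Int) (coords : List (Int × Int)) : Int × List Int × List Int :=
  if coords.length > 0 then
    -- for num, junction in enumerate(coords, 0): append size/st
    let acc := (PySem.List.enumerate coords 0).foldl
      (fun (acc : List Int × List Int) p =>
        let s := stepA start coords p
        (acc.1 ++ [s.2], acc.2 ++ [s.1]))
      ([], [])
    -- coords[-1] is in range (coords nonempty here), so pyGet? … getD is exact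
    let st := ((PySem.List.pyGet? coords (-1)).getD (0, 0)).2 - start
    let size := end_ - (st + start)
    let starts := acc.2 ++ [st]
    let sizes := acc.1 ++ [size]
    ((starts.length : Int), sizes, starts)
  else
    (1, [end_ - start], [0])

-- ===== PORT B =====
-- rest_blocks in Source B: recursion over the remaining junctions, carrying the current block's start
def restBlocks (start : Int) (end_ : Int) (blockStart : Int) : List (Int × Int) → List Int × List Int
  | [] => ([end_ - blockStart], [blockStart - start])
  | (ss1, ss2) :: rest =>
    let p := restBlocks start end_ ss2 rest
    ((ss1 - blockStart) :: p.1, (blockStart - start) :: p.2)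

def junctionsToBed12_alt (start : Int) (end_ : Int) (coords : List (Int × Int)) : Int × List Int × List Int :=
  match coords with
  | [] => (1, [end_ - start], [0])
  | (ss1, ss2) :: rest =>
    let p := restBlocks start end_ ss2 rest
    (((p.2.length : Int) + 1), |start - ss1| :: p.1, 0 :: p.2)

-- ===== PRECONDITION & SPEC =====
def Spec_junctionsToBed12 (start : Int) (end_ : Int) (coords : List (Int × Int)) (out : Int × List Int × List Int) : Prop := out = junctionsToBed12_alt start end_ coords
instance (start : Int) (end_ : Int) (coords : List (Int × Int)) (out : Int × List Int × List Int) : Decidable (Spec_junctionsToBed12 start end_ coords out) := by unfold Spec_junctionsToBed12; infer_instance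

-- ===== CLAIM (what is proved, stated in full; the proofs are below) =====
def Claim_equal_junctionsToBed12 : Prop := ∀ (start : Int) (end_ : Int) (coords : List (Int × Int)), Dom_junctionsToBed12 start end_ coords → Spec_junctionsToBed12 start end_ coords (junctionsToBed12 start end_ coords)

-- ===== LEMMAS AND PROOFS =====

-- closed form of B's recursion: starts and sizes in terms of the boundary lists
lemma restBlocks_eq (start end_ bs : Int) (rest : List (Int × Int)) :
    restBlocks start end_ bs rest
      = (List.zipWith (fun s e => e - s) (bs :: rest.map (·.2)) (rest.map (·.1) ++ [end_]),
         (bs :: rest.map (·.2)).map (fun x => x - start)) := by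
  induction rest generalizing bs with
  | nil => simp [restBlocks]
  | cons x xs ih => cases x; simp [restBlocks, ih]

-- A's loop appends one size and one st per iteration: it is the pair of mapped lists.
lemma foldl_pair {α : Type} (l : List α) (h : α → Int × Int) (s1 s2 : List Int) :
    l.foldl (fun (acc : List Int × List Int) p =>
        let s := h p
        (acc.1 ++ [s.2], acc.2 ++ [s.1])) (s1, s2)
      = (s1 ++ l.map (fun p => (h p).2), s2 ++ l.map (fun p => (h p).1)) := by
  induction l generalizing s1 s2 with
  | nil => simp
  | cons x xs ih => simp [ih]

-- coords[-1] on a nonempty list is its last element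
lemma pyGet_last (c : Int × Int) (cs : List (Int × Int)) :
    (PySem.List.pyGet? (c :: cs) (-1)).getD (0, 0) = (c :: cs)[cs.length] := by
  simp [PySem.List.pyGet?, PySem.List.pyIdx?]

-- coords[num-1] for a natural index num = i ≥ 1
lemma pyGet_pred (xs : List (Int × Int)) (i : Nat) (h1 : 1 ≤ i) (h2 : i - 1 < xs.length) :
    (PySem.List.pyGet? xs ((i : Int) - 1)).getD (0, 0) = xs[i - 1] := by
  have : ((i : Int) - 1) = ((i - 1 : Nat) : Int) := by omega
  rw [this, PySem.List.pyGet?_ofNat xs (i - 1) h2]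
  rfl

-- A's starts list equals B's starts list (for nonempty coords)
lemma starts_eq (start : Int) (c : Int × Int) (cs : List (Int × Int)) :
    ((PySem.List.enumerate (c :: cs) 0).map (fun p => (stepA start (c :: cs) p).1))
        ++ [((PySem.List.pyGet? (c :: cs) (-1)).getD (0, 0)).2 - start]
      = (start :: (c :: cs).map (·.2)).map (fun s => s - start) := by
  apply List.ext_getElem
  · simp [PySem.List.length_enumerate]
  · intro i hi hi'
    have hlen : i < cs.length + 2 := by
      simp [PySem.List.length_enumerate] at hi; omega
    by_cases hli : i < cs.length + 1
    · rw [List.getElem_append_left (by simp [PySem.List.length_enumerate]; omega)]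
      rw [List.getElem_map, PySem.List.getElem_enumerate]
      rcases Nat.eq_zero_or_pos i with h0 | hpos
      · subst h0; simp [stepA]
      · have hne0 : i ≠ 0 := by omega
        have hne : ((i : Int) == 0) = false := by simp; omega
        simp only [stepA, zero_add, hne, Bool.false_eq_true, if_false]
        rw [pyGet_pred _ i hpos (by simp; omega)]
        simp [List.getElem_cons, hne0]
        split_ifs <;> rfl
    · have hieq : i = cs.length + 1 := by omega
      subst hieq
      rw [List.getElem_append_right (by simp [PySem.List.length_enumerate])]
      simp [PySem.List.length_enumerate, pyGet_last, List.getElem_cons]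
      split_ifs <;> rfl

-- A's sizes list equals B's sizes list (for nonempty coords)
lemma sizes_eq (start end_ : Int) (c : Int × Int) (cs : List (Int × Int)) :
    ((PySem.List.enumerate (c :: cs) 0).map (fun p => (stepA start (c :: cs) p).2))
        ++ [end_ - ((((PySem.List.pyGet? (c :: cs) (-1)).getD (0, 0)).2 - start) + start)]
      = |start - c.1| ::
          List.zipWith (fun s e => e - s) (c.2 :: cs.map (·.2)) (cs.map (·.1) ++ [end_]) := by
  apply List.ext_getElem
  · simp [PySem.List.length_enumerate]
  · intro i hi hi'
    have hlen : i < cs.length + 2 := by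
      simp [PySem.List.length_enumerate] at hi; omega
    by_cases hli : i < cs.length + 1
    · rw [List.getElem_append_left (by simp [PySem.List.length_enumerate]; omega)]
      rw [List.getElem_map, PySem.List.getElem_enumerate]
      rcases Nat.eq_zero_or_pos i with h0 | hpos
      · subst h0; simp [stepA]
      · have hne0 : i ≠ 0 := by omega
        have hne : ((i : Int) == 0) = false := by simp; omega
        simp only [stepA, zero_add, hne, Bool.false_eq_true, if_false]
        rw [pyGet_pred _ i hpos (by simp; omega)]
        simp only [List.getElem_cons, hne0, dite_false, List.getElem_zipWith,
          List.getElem_map, List.getElem_append]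
        have : i - 1 < cs.length ∨ ¬ (i - 1 < cs.length) := em _
        rcases Nat.lt_or_ge (i - 1) cs.length with hlt | hge
        · simp [hlt]
          split_ifs with h
          · omega
          · ring
        · omega
    · have hieq : i = cs.length + 1 := by omega
      subst hieq
      rw [List.getElem_append_right (by simp [PySem.List.length_enumerate])]
      simp [PySem.List.length_enumerate, pyGet_last, List.getElem_zipWith, List.getElem_cons]
      split_ifs
      · omega
      · omega

-- ===== VERDICT (by name: the statement is the Claim_ definition above) =====
theorem junctionsToBed12_spec : Claim_equal_junctionsToBed12 := by
  intro start end_ coords _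
  unfold Spec_junctionsToBed12
  cases coords with
  | nil => rfl
  | cons c cs =>
    cases c with
    | mk ss1 ss2 =>
      show junctionsToBed12 start end_ ((ss1, ss2) :: cs) = _
      unfold junctionsToBed12 junctionsToBed12_alt
      simp only [List.length_cons, if_pos, gt_iff_lt, Nat.zero_lt_succ]
      rw [foldl_pair, restBlocks_eq]
      simp only [List.nil_append]
      have hstarts := starts_eq start (ss1, ss2) cs
      have hsizes := sizes_eq start end_ (ss1, ss2) cs
      refine Prod.ext ?_ (Prod.ext ?_ ?_)
      · simp only [List.length_append, List.length_map, PySem.List.length_enumerate,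
          List.length_cons, List.length_nil]
        push_cast; ring
      · simpa using hsizes
      · have : (start :: ((ss1, ss2) :: cs).map (·.2)).map (fun s => s - start)
             = 0 :: (ss2 :: cs.map (·.2)).map (fun x => x - start) := by simp
        rw [hstarts, this]
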